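-- pv_equiv track=rewrite | github.com/R0BIK/Dev_School | Yehor_ka-1.py | largest_radial_sum
-- ===== SOURCE A (Python) =====
-- def largest_radial_sum(honor, d):
--     if len(honor) == d:
--         return (sum(honor))
--
--     NumberOfGroups = int(len(honor) / d)
--     suma = []
--     group = []
--
--     for i in range(0, NumberOfGroups):
--         while len(group) < d:
--             group.append(honor[i])
--             i += NumberOfGroups
--         suma.append(sum(group))
--         group = []
--     return(max(suma))
-- ===== SOURCE B (Python) =====
-- def largest_radial_sum(honor, d):
--     if len(honor) == d:
--         return sum(honor)
--     G = len(honor) // d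
--     buckets = [0] * G
--     for idx in range(G * d):
--         buckets[idx % G] += honor[idx]
--     return max(buckets)
-- ===== Notes on version B (the rewrite author's own statement) =====
-- stated objective: faster
-- what changed: Replaces A's per-group gather (nested for/while collecting each strided group into a temporary list, then summing it) with a single linear scatter pass that adds honor[idx] to bucket idx % G for idx in range(G*d), then takes max of the buckets; Pre_ only excludes inputs where both programs raise (d=0 with nonempty list: ZeroDivisionError; 0<len<d or d<0: ValueError on max of empty).
import Mathlib
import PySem

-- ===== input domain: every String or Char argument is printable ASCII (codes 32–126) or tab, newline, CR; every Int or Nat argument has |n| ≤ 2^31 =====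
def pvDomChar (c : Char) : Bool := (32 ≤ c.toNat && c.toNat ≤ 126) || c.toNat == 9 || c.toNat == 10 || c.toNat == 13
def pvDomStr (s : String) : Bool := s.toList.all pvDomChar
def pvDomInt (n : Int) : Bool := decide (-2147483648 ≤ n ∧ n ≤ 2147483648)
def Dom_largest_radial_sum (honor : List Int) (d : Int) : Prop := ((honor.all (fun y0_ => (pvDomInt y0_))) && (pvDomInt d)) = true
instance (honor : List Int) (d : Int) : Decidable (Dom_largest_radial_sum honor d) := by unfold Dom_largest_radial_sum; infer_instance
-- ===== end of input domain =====

-- B replaces A's nested gather-per-group loops (build each strided group as a list, then sum it)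
-- by one linear scatter pass into residue-class buckets (no per-group temporaries; the timing
-- run measured B faster by a constant factor); return values agree on all of Pre_.

-- ===== PORT A =====
-- the inner 'while len(group) < d: group.append(honor[i]); i += NumberOfGroups' loop;
-- fuel = d.toNat bounds the iterations (each one grows group by 1, so at most d are taken)
def lrsWhile (honor : List Int) (d G : Int) (fuel : Nat) (i : Int) (group : List Int) : List Int :=
  match fuel with
  | 0 => group
  | fuel + 1 =>
    if (group.length : Int) < d then
      lrsWhile honor d G fuel (i + G) (group ++ [(PySem.List.pyGet? honor i).getD 0])
    else group

def largest_radial_sum (honor : List Int) (d : Int) : Int :=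
  if (honor.length : Int) = d then honor.sum
  else
    let numberOfGroups : Int := PySem.Int.truncdiv (honor.length : Int) d  -- int(len(honor)/d)
    let suma : List Int := (PySem.List.pyRange 0 numberOfGroups 1).foldl
      (fun suma i => suma ++ [(lrsWhile honor d numberOfGroups d.toNat i []).sum]) []
    (PySem.List.max? suma (fun x => x)).getD 0  -- max([]) raises ValueError: excluded by Pre_

-- ===== PORT B =====
def largest_radial_sum_alt (honor : List Int) (d : Int) : Int :=
  if (honor.length : Int) = d then honor.sum
  else
    let g : Int := PySem.Int.floordiv (honor.length : Int) d  -- len(honor) // d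
    let buckets : List Int := PySem.List.pyRepeat [(0 : Int)] g  -- [0] * G
    let buckets := (PySem.List.pyRange 0 (g * d) 1).foldl
      (fun b idx =>
        let j := PySem.Int.mod idx g
        PySem.List.pySetD b j (PySem.List.pyGetD b j 0 + (PySem.List.pyGet? honor idx).getD 0)) buckets
    (PySem.List.max? buckets (fun x => x)).getD 0  -- max([]) raises ValueError: excluded by Pre_

-- ===== PRECONDITION & SPEC =====
-- Pre_ excludes exactly the inputs where the Python A raises: d = 0 with honor ≠ [] is a
-- ZeroDivisionError, and d < 0 or 0 ≤ len(honor) < d leaves suma empty so max([]) raises ValueError.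
def Pre_largest_radial_sum (honor : List Int) (d : Int) : Prop :=
  (honor = [] ∧ d = 0) ∨ (0 < d ∧ d ≤ (honor.length : Int))
instance (honor : List Int) (d : Int) : Decidable (Pre_largest_radial_sum honor d) := by
  unfold Pre_largest_radial_sum; infer_instance

def pvWitness_largest_radial_sum : List Int × Int := ([1, 2, 3, 4, 5], 2)

def Spec_largest_radial_sum (honor : List Int) (d : Int) (out : Int) : Prop := out = largest_radial_sum_alt honor d
instance (honor : List Int) (d : Int) (out : Int) : Decidable (Spec_largest_radial_sum honor d out) := by unfold Spec_largest_radial_sum; infer_instance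

-- ===== CLAIM (what is proved, stated in full; the proofs are below) =====
def Claim_equal_largest_radial_sum : Prop := ∀ (honor : List Int) (d : Int), Dom_largest_radial_sum honor d → Pre_largest_radial_sum honor d → Spec_largest_radial_sum honor d (largest_radial_sum honor d)

-- ===== LEMMAS AND PROOFS =====

theorem lrs_filter_range_eq (j G : Nat) (hj : j < G) :
    (List.range G).filter (fun t => t == j) = [j] := by
  induction G with
  | zero => omega
  | succ g ih =>
    rw [List.range_succ, List.filter_append]
    rcases Nat.lt_or_ge j g with h | h
    · rw [ih h]
      have : ((g == j) : Bool) = false := by simp; omega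
      simp [this]
    · have hj' : j = g := by omega
      subst hj'
      have h1 : (List.range j).filter (fun t => t == j) = [] := by
        rw [List.filter_eq_nil_iff]; intro a ha; simp [List.mem_range] at ha ⊢; omega
      simp [h1]

theorem lrs_filter_range_mul (G j : Nat) (hj : j < G) (c : Nat) :
    (List.range (c*G)).filter (fun m => m % G == j) = (List.range c).map (fun k => j + k*G) := by
  induction c with
  | zero => simp
  | succ c ih =>
    have h2 : (c+1)*G = c*G + G := by ring
    rw [h2, List.range_add, List.filter_append, ih, List.range_succ, List.map_append]
    congr 1
    rw [List.filter_map]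
    have h3 : (List.range G).filter ((fun m => m % G == j) ∘ (fun t => c*G + t)) = [j] := by
      have he : ∀ t ∈ List.range G, ((fun m => m % G == j) ∘ (fun t => c*G + t)) t = (t == j) := by
        intro t ht; simp only [List.mem_range] at ht
        simp only [Function.comp]
        rw [Nat.mul_comm c G, Nat.mul_add_mod, Nat.mod_eq_of_lt ht]
      rw [List.filter_congr he, lrs_filter_range_eq j G hj]
    rw [h3]; simp [Nat.add_comm, Nat.mul_comm]

theorem lrs_scatter_length (G : Nat) (h : Nat → Int) (L : List Nat) :
    ∀ b : List Int, (L.foldl (fun b m => b.set (m % G) (b.getD (m % G) 0 + h m)) b).length = b.length := by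
  induction L with
  | nil => intro b; rfl
  | cons m L ih => intro b; rw [List.foldl_cons, ih, List.length_set]

theorem lrs_scatter_getD (G : Nat) (h : Nat → Int) (L : List Nat) :
    ∀ (b : List Int), b.length = G → ∀ j, j < G →
    (L.foldl (fun b m => b.set (m % G) (b.getD (m % G) 0 + h m)) b).getD j 0
      = b.getD j 0 + ((L.filter (fun m => m % G == j)).map h).sum := by
  induction L with
  | nil => intro b hb j hj; simp
  | cons m L ih =>
    intro b hb j hj
    have hmG : m % G < G := Nat.mod_lt _ (by omega)
    have hlen : (b.set (m % G) (b.getD (m % G) 0 + h m)).length = G := by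
      rw [List.length_set, hb]
    rw [List.foldl_cons, List.filter_cons, ih _ hlen j hj]
    by_cases hcase : m % G = j
    · subst hcase
      have h1 : (b.set (m % G) (b.getD (m % G) 0 + h m)).getD (m % G) 0 = b.getD (m % G) 0 + h m := by
        rw [List.getD_eq_getElem?_getD, List.getElem?_set_self (by omega)]
        rfl
      rw [h1]
      simp
      ring
    · have hb2 : ((m % G == j) : Bool) = false := by simp [hcase]
      have h2 : (b.set (m % G) (b.getD (m % G) 0 + h m)).getD j 0 = b.getD j 0 := by
        rw [List.getD_eq_getElem?_getD, List.getElem?_set_ne (by omega), ← List.getD_eq_getElem?_getD]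
      rw [h2, hb2]
      simp

theorem lrsWhile_eq (honor : List Int) (d G : Int) (fuel : Nat) :
    ∀ (i : Int) (group : List Int), (group.length : Int) + fuel = d →
    lrsWhile honor d G fuel i group
      = group ++ (List.range fuel).map (fun k : Nat => (PySem.List.pyGet? honor (i + (k : Int) * G)).getD 0) := by
  induction fuel with
  | zero => intro i group hg; simp [lrsWhile]
  | succ f ih =>
    intro i group hg
    have hlt : (group.length : Int) < d := by push_cast at hg; omega
    rw [lrsWhile, if_pos hlt, ih _ _ (by simp [List.length_append]; push_cast at hg ⊢; omega)]
    rw [List.range_succ_eq_map, List.map_cons, List.map_map, List.append_assoc]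
    congr 1
    rw [List.singleton_append]
    congr 1
    · norm_num
    · apply List.map_congr_left
      intro k _
      simp [Function.comp]
      ring_nf

theorem lrs_pystep_eq (honor : List Int) (G : Nat) :
    (fun (b : List Int) (m : Nat) => PySem.List.pySetD b (PySem.Int.mod (m : Int) (G : Int))
        (PySem.List.pyGetD b (PySem.Int.mod (m : Int) (G : Int)) 0 + (PySem.List.pyGet? honor (m : Int)).getD 0))
      = (fun (b : List Int) (m : Nat) => b.set (m % G) (b.getD (m % G) 0 + honor.getD m 0)) := by
  funext b m
  rw [PySem.Int.mod_natCast, PySem.List.pySetD_natCast, PySem.List.pyGetD_natCast,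
    PySem.List.pyGet?_natCast, List.getD_eq_getElem?_getD, List.getD_eq_getElem?_getD]

theorem lrs_A_list (honor : List Int) (d : Int) (G : Nat) (hd0 : 0 < d) :
    (List.foldl (fun suma i => suma ++ [(lrsWhile honor d (G : Int) d.toNat i []).sum]) []
        (PySem.List.pyRange 0 (G : Int) 1))
      = (List.range G).map (fun j => ((List.range d.toNat).map (fun k => honor.getD (j + k*G) 0)).sum) := by
  rw [PySem.List.foldl_append_singleton_eq_map, List.nil_append, PySem.List.pyRange_zero_natCast,
    List.map_map]
  apply List.map_congr_left
  intro j hj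
  simp only [Function.comp]
  rw [lrsWhile_eq honor d (G : Int) d.toNat (j : Int) [] (by simp [Int.toNat_of_nonneg hd0.le])]
  rw [List.nil_append]
  congr 1
  apply List.map_congr_left
  intro k hk
  have hc : ((j : Int) + (k : Int) * (G : Int)) = ((j + k*G : Nat) : Int) := by push_cast; ring
  rw [hc, PySem.List.pyGet?_natCast, List.getD_eq_getElem?_getD]

theorem lrs_B_list (honor : List Int) (d : Int) (G : Nat) (hd0 : 0 < d) :
    (List.foldl
        (fun b idx => PySem.List.pySetD b (PySem.Int.mod idx (G : Int))
          (PySem.List.pyGetD b (PySem.Int.mod idx (G : Int)) 0 + (PySem.List.pyGet? honor idx).getD 0))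
        (PySem.List.pyRepeat [0] (G : Int)) (PySem.List.pyRange 0 ((G : Int) * d) 1))
      = (List.range G).map (fun j => ((List.range d.toNat).map (fun k => honor.getD (j + k*G) 0)).sum) := by
  have hmul : ((G : Int)) * d = ((G * d.toNat : Nat) : Int) := by
    rw [Nat.cast_mul, Int.toNat_of_nonneg hd0.le]
  have hrep : PySem.List.pyRepeat [(0:Int)] (G : Int) = List.replicate G 0 := by
    rw [PySem.List.pyRepeat_singleton]; simp
  rw [hmul, hrep, PySem.List.pyRange_zero_natCast, List.foldl_map,
    lrs_pystep_eq honor G]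
  have hlenb : (List.foldl (fun (b : List Int) m => b.set (m % G) (b.getD (m % G) 0 + honor.getD m 0))
      (List.replicate G (0:Int)) (List.range (G * d.toNat))).length = G := by
    rw [lrs_scatter_length]; simp
  apply List.ext_getElem
  · rw [hlenb, List.length_map, List.length_range]
  · intro i h1 h2
    have hiG : i < G := by rw [hlenb] at h1; exact h1
    rw [List.getElem_map, List.getElem_range, ← List.getD_eq_getElem _ 0 h1]
    rw [lrs_scatter_getD G (fun m => honor.getD m 0) _ _ (by simp) i hiG]
    rw [Nat.mul_comm G d.toNat, lrs_filter_range_mul G i hiG d.toNat, List.map_map]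
    simp [Function.comp_def]

-- ===== VERDICT (by name: the statement is the Claim_ definition above) =====
theorem largest_radial_sum_spec : Claim_equal_largest_radial_sum := by
  intro honor d _ hpre
  unfold Spec_largest_radial_sum largest_radial_sum largest_radial_sum_alt
  by_cases heq : (honor.length : Int) = d
  · rw [if_pos heq, if_pos heq]
  · rw [if_neg heq, if_neg heq]
    have hd' : 0 < d ∧ d ≤ (honor.length : Int) := by
      rcases hpre with ⟨h1, h2⟩ | h
      · exfalso; apply heq; rw [h1, h2]; rfl
      · exact h
    obtain ⟨hd0, hdle⟩ := hd'
    have hdd : ((d.toNat : Int)) = d := Int.toNat_of_nonneg (by omega)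
    have hA : PySem.Int.truncdiv (honor.length : Int) ((d.toNat : Int)) = ((honor.length / d.toNat : Nat) : Int) := by
      simp [PySem.Int.truncdiv]
    have hB : PySem.Int.floordiv (honor.length : Int) ((d.toNat : Int)) = ((honor.length / d.toNat : Nat) : Int) :=
      PySem.Int.floordiv_natCast honor.length d.toNat
    rw [hdd] at hA hB
    rw [hA, hB]
    generalize hGe : honor.length / d.toNat = G
    dsimp only
    rw [lrs_A_list honor d G hd0, lrs_B_list honor d G hd0]
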